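-- pv_equiv track=rewrite | github.com/Micka-R/Huffman-tree | huffman.py | tobinary
-- ===== SOURCE A (Python) =====
-- def __BintoChar(bin):
--     """
--     gives the char corresponding to a bin value in the ASSCI table
--     """
--     num = bin
--     dec_value = 0
--     base1 = 1
--     len1 = len(num)
--     for i in range(len1 - 1, -1, -1):
--         if (num[i] == '1'):
--             dec_value += base1
--         base1 = base1 * 2
--     return chr(dec_value)
--
-- def tobinary(dataIN):
--     """
--     Compresses a string containing binary code to its real binary value.
--     """
--     res=""
--     align = 0
--     temp=""
--     count = 0
--     for char in dataIN:
--         if count == 8: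
--             count = 0
--             res += __BintoChar(temp)
--             temp = "" + char
--             count += 1
--         else:
--             count += 1
--             temp += char
--     if count >0:
--         align = 8 - count
--         res += __BintoChar(temp)
--     return (res,align)
-- ===== SOURCE B (Python) =====
-- def _chunk_char(chunk):
--     val = 0
--     for c in chunk:
--         val = 2 * val + (1 if c == '1' else 0)
--     return chr(val)
--
-- def tobinary(dataIN):
--     n = len(dataIN)
--     out = []
--     i = 0
--     while i < n:
--         out.append(_chunk_char(dataIN[i:i+8]))
--         i += 8
--     return ("".join(out), -n % 8)
-- ===== Notes on version B (the rewrite author's own statement) =====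
-- stated objective: simpler
-- what changed: Replaces A's per-character counter/flush state machine with direct iteration over 8-character slices, an MSB-first Horner accumulation instead of A's backwards base-doubling scan, and a closed-form padding -len(dataIN) % 8 instead of leftover loop state; slice-wise processing also avoids A's per-character string concatenation (measured ~2x constant-factor speedup).
import Mathlib
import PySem

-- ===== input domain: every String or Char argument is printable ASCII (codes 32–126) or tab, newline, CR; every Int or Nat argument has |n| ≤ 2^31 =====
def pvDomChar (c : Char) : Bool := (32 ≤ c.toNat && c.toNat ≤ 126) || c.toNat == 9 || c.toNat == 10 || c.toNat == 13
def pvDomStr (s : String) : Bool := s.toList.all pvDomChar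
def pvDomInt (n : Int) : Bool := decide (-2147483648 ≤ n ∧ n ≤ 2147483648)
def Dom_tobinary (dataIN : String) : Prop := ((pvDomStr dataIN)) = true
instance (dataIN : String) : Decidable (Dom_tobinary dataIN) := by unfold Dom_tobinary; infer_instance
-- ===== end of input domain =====

-- B replaces A's per-character counter/flush state machine with direct 8-character
-- slicing, Horner (MSB-first) accumulation and a closed-form padding -len % 8 (objective: simpler).

-- ===== PORT A =====
-- A's helper __BintoChar: backwards index loop over range(len-1, -1, -1), base doubling each step.
def binToChar (num : List Char) : Char :=
  Char.ofNat
    (((PySem.List.pyRange ((num.length : Int) - 1) (-1) (-1)).foldl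
        (fun (p : Int × Int) i =>
          ((if PySem.List.pyGetD num i ' ' = '1' then p.1 + p.2 else p.1), p.2 * 2))
        (0, 1)).1.toNat)

-- one step of A's for-loop; state = (res, temp, count)
def tobinaryStep (st : List Char × List Char × Int) (char : Char) : List Char × List Char × Int :=
  if st.2.2 = 8 then (st.1 ++ [binToChar st.2.1], [char], 1)
  else (st.1, st.2.1 ++ [char], st.2.2 + 1)

def tobinary (dataIN : String) : String × Int :=
  let st := dataIN.toList.foldl tobinaryStep ([], [], 0)
  if 0 < st.2.2 then (String.ofList (st.1 ++ [binToChar st.2.1]), 8 - st.2.2)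
  else (String.ofList st.1, (0 : Int))

-- ===== PORT B =====
-- Source B's _chunk_char: Horner accumulation over the chunk.
def chunkChar (chunk : List Char) : Char :=
  Char.ofNat
    ((chunk.foldl (fun v c => 2 * v + (if c = '1' then (1 : Int) else 0)) 0).toNat)

-- Source B's while-loop over chunk start indices i = 0, 8, 16, …
def chunkLoop (s : List Char) (i : Nat) : List Char :=
  if h : i < s.length then
    chunkChar (PySem.List.slice s (some (i : Int)) (some ((i : Int) + 8))) ::
      chunkLoop s (i + 8)
  else []
termination_by s.length - i

def tobinary_alt (dataIN : String) : String × Int :=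
  (String.ofList (chunkLoop dataIN.toList 0),
   PySem.Int.mod (-(dataIN.toList.length : Int)) 8)

-- ===== PRECONDITION & SPEC =====
def Spec_tobinary (dataIN : String) (out : String × Int) : Prop := out = tobinary_alt dataIN
instance (dataIN : String) (out : String × Int) : Decidable (Spec_tobinary dataIN out) := by unfold Spec_tobinary; infer_instance

-- ===== CLAIM (what is proved, stated in full; the proofs are below) =====
def Claim_equal_tobinary : Prop := ∀ (dataIN : String), Dom_tobinary dataIN → Spec_tobinary dataIN (tobinary dataIN)

-- ===== LEMMAS AND PROOFS =====

-- least-significant-bit-first value of a bit string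
def lsb : List Char → Int
  | [] => 0
  | c :: t => (if c = '1' then 1 else 0) + 2 * lsb t

lemma lsb_append_singleton (xs : List Char) (c : Char) :
    lsb (xs ++ [c]) = lsb xs + (if c = '1' then 1 else 0) * 2 ^ xs.length := by
  induction xs with
  | nil => simp [lsb]
  | cons x t ih => simp [lsb, ih]; try (split_ifs <;> ring)

lemma reverse_eq_map_range (num : List Char) :
    num.reverse = (List.range num.length).map (fun k => num.getD (num.length - 1 - k) ' ') := by
  apply List.ext_getElem
  · simp
  · intro k h1 h2
    simp only [List.getElem_reverse, List.getElem_map, List.getElem_range]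
    rw [List.getD_eq_getElem]

lemma revfold_spec (l : List Char) (p : Int × Int) :
    l.foldl (fun (p : Int × Int) c =>
        ((if c = '1' then p.1 + p.2 else p.1), p.2 * 2)) p
      = (p.1 + p.2 * lsb l, p.2 * 2 ^ l.length) := by
  induction l generalizing p with
  | nil => simp [lsb]
  | cons c t ih =>
    simp only [List.foldl_cons, ih, lsb, List.length_cons]
    split_ifs <;> refine Prod.ext ?_ ?_ <;> simp <;> try ring

lemma binToChar_value (num : List Char) :
    binToChar num = Char.ofNat (lsb num.reverse).toNat := by
  unfold binToChar
  have hb : ((num.length : Int) - 1 - -1).toNat = num.length := by omega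
  rw [PySem.List.pyRange_neg_one, hb, List.foldl_map]
  have hfun : (List.range num.length).foldl
      (fun (p : Int × Int) (k : Nat) =>
        ((if PySem.List.pyGetD num ((num.length : Int) - 1 - (k : Int)) ' ' = '1' then p.1 + p.2 else p.1),
          p.2 * 2)) (0, 1)
      = (List.range num.length).foldl
      (fun (p : Int × Int) (k : Nat) =>
        ((if num.getD (num.length - 1 - k) ' ' = '1' then p.1 + p.2 else p.1),
          p.2 * 2)) (0, 1) := by
    apply List.foldl_ext
    intro p k hk
    have hk' : k < num.length := List.mem_range.mp hk
    have hcast : (num.length : Int) - 1 - (k : Int) = ((num.length - 1 - k : Nat) : Int) := by omega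
    rw [hcast, PySem.List.pyGetD_natCast]
  rw [hfun]
  have h2 : (List.range num.length).foldl
      (fun (p : Int × Int) (k : Nat) =>
        ((if num.getD (num.length - 1 - k) ' ' = '1' then p.1 + p.2 else p.1),
          p.2 * 2)) (0, 1)
      = num.reverse.foldl
      (fun (p : Int × Int) c =>
        ((if c = '1' then p.1 + p.2 else p.1), p.2 * 2)) (0, 1) := by
    conv_rhs => rw [reverse_eq_map_range]
    rw [List.foldl_map]
  rw [h2, revfold_spec]
  simp

lemma horner_spec (l : List Char) (a : Int) :
    l.foldl (fun v c => 2 * v + (if c = '1' then (1 : Int) else 0)) a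
      = a * 2 ^ l.length + lsb l.reverse := by
  induction l generalizing a with
  | nil => simp [lsb]
  | cons c t ih =>
    simp only [List.foldl_cons, ih, List.reverse_cons, lsb_append_singleton,
      List.length_reverse, List.length_cons]
    ring

lemma binToChar_eq_chunkChar (num : List Char) : binToChar num = chunkChar num := by
  rw [binToChar_value]
  unfold chunkChar
  rw [horner_spec]
  simp

-- pure-chunk recursion equivalent to B's index loop
def chunksRec (s : List Char) : List Char :=
  if h : s = [] then []
  else chunkChar (s.take 8) :: chunksRec (s.drop 8)
termination_by s.length
decreasing_by
  cases s with
  | nil => exact absurd rfl h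
  | cons c t => simp only [List.length_drop, List.length_cons]; omega

lemma chunkLoop_eq_chunksRec (s : List Char) (i : Nat) :
    chunkLoop s i = chunksRec (s.drop i) := by
  rw [chunkLoop]
  split
  · rename_i h
    have hslice : PySem.List.slice s (some (i : Int)) (some ((i : Int) + 8))
        = (s.drop i).take 8 := by
      have h8 : ((i : Int) + 8) = ((i : Int) + ((8 : Nat) : Int)) := by norm_num
      rw [h8, PySem.List.slice_natCast_add]
    have hne : s.drop i ≠ [] := by
      intro hnil
      have := congrArg List.length hnil
      simp only [List.length_drop, List.length_nil] at this
      omega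
    rw [hslice, chunkLoop_eq_chunksRec s (i + 8)]
    conv_rhs => rw [chunksRec]
    rw [dif_neg hne]
    congr 1
    rw [List.drop_drop]
  · rename_i hge
    have hnil : s.drop i = [] := by
      apply List.eq_nil_of_length_eq_zero
      simp only [List.length_drop]
      omega
    rw [hnil, chunksRec]
    simp
termination_by s.length - i
decreasing_by omega

lemma mod_neg_small (t : Int) (h1 : 1 ≤ t) (h2 : t ≤ 8) :
    PySem.Int.mod (-t) 8 = 8 - t := by
  rw [PySem.Int.mod_eq_emod_of_pos (by omega)]
  omega

-- main loop invariant: from a partial chunk temp (1 ≤ |temp| ≤ 8) with count = |temp|,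
-- A's fold plus its final flush produces B's chunking of temp ++ l.
lemma main_loop (l : List Char) (temp res : List Char)
    (h1 : 1 ≤ temp.length) (h2 : temp.length ≤ 8) :
    (let st := l.foldl tobinaryStep (res, temp, (temp.length : Int))
     ((if 0 < st.2.2 then st.1 ++ [binToChar st.2.1] else st.1),
      (if 0 < st.2.2 then 8 - st.2.2 else 0)))
    = (res ++ chunksRec (temp ++ l),
       PySem.Int.mod (-((temp.length : Int) + l.length)) 8) := by
  induction l generalizing temp res with
  | nil =>
    simp only [List.foldl_nil, List.append_nil]
    have hpos : (0 : Int) < temp.length := by exact_mod_cast h1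
    rw [if_pos hpos, if_pos hpos, chunksRec]
    have hne : temp ≠ [] := by intro h; subst h; simp at h1
    have htake : temp.take 8 = temp := List.take_of_length_le h2
    have hdrop : temp.drop 8 = [] := List.drop_eq_nil_of_le h2
    simp only [hne, dite_false, htake, hdrop]
    rw [chunksRec]
    simp only [dite_true, binToChar_eq_chunkChar]
    rw [show -((temp.length : Int) + ((([] : List Char).length : Nat) : Int))
          = -(temp.length : Int) by simp]
    rw [mod_neg_small _ (by exact_mod_cast h1) (by exact_mod_cast h2)]
    try simp
  | cons c l' ih =>
    simp only [List.foldl_cons]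
    by_cases h8 : temp.length = 8
    · have hstep : tobinaryStep (res, temp, (temp.length : Int)) c
          = (res ++ [binToChar temp], [c], 1) := by
        unfold tobinaryStep
        simp [h8]
      rw [hstep]
      rw [show ((res ++ [binToChar temp], ([c], (1 : Int))) :
            List Char × List Char × Int)
          = (res ++ [binToChar temp], [c], ((([c] : List Char).length : Nat) : Int)) by simp]
      rw [ih [c] (res ++ [binToChar temp]) (by simp) (by simp)]
      have hchunks : chunksRec (temp ++ c :: l') = binToChar temp :: chunksRec (c :: l') := by
        rw [chunksRec]
        have hne : temp ++ c :: l' ≠ [] := by simp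
        have htake : (temp ++ c :: l').take 8 = temp := by
          rw [List.take_append_of_le_length (by omega)]
          exact List.take_of_length_le (by omega)
        have hdrop : (temp ++ c :: l').drop 8 = c :: l' := by
          rw [List.drop_append_of_le_length (by omega)]
          simp [h8]
        simp only [hne, dite_false, htake, hdrop, binToChar_eq_chunkChar]
      rw [hchunks]
      simp only [Prod.mk.injEq]
      constructor
      · simp
      · rw [PySem.Int.mod_eq_emod_of_pos (by omega), PySem.Int.mod_eq_emod_of_pos (by omega)]
        simp only [List.length_cons, List.length_nil]
        have h8' : ((temp.length : Nat) : Int) = 8 := by exact_mod_cast h8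
        push_cast
        omega
    · have hstep : tobinaryStep (res, temp, (temp.length : Int)) c
          = (res, temp ++ [c], (temp.length : Int) + 1) := by
        unfold tobinaryStep
        have : ((temp.length : Int)) ≠ 8 := by
          intro h; apply h8; exact_mod_cast h
        simp [this]
      rw [hstep]
      rw [show ((res, temp ++ [c], ((temp.length : Int) + 1)) :
            List Char × List Char × Int)
          = (res, temp ++ [c], (((temp ++ [c]).length : Nat) : Int)) by simp]
      rw [ih (temp ++ [c]) res (by simp) (by simp only [List.length_append, List.length_singleton]; omega)]
      simp only [Prod.mk.injEq]
      constructor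
      · simp
      · congr 1
        simp only [List.length_append, List.length_cons, List.length_nil]
        push_cast
        ring

-- ===== VERDICT (by name: the statement is the Claim_ definition above) =====
theorem tobinary_spec : Claim_equal_tobinary := by
  intro dataIN _
  unfold Spec_tobinary tobinary tobinary_alt
  rw [chunkLoop_eq_chunksRec]
  simp only [List.drop_zero]
  cases hs : dataIN.toList with
  | nil =>
    rw [chunksRec]
    simp [PySem.Int.mod]
  | cons c l =>
    simp only [List.foldl_cons]
    have hstep : tobinaryStep ([], [], 0) c = ([], [c], 1) := by
      unfold tobinaryStep; simp
    rw [hstep]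
    have hml := main_loop l [c] [] (by simp) (by simp)
    simp only [List.length_singleton, Nat.cast_one, List.nil_append,
      List.singleton_append] at hml
    rw [Prod.mk.injEq] at hml
    obtain ⟨hfst, hsnd⟩ := hml
    have hsplit : (if 0 < (l.foldl tobinaryStep (([] : List Char), [c], (1 : Int))).2.2 then
          (String.ofList ((l.foldl tobinaryStep (([] : List Char), [c], (1 : Int))).1
              ++ [binToChar (l.foldl tobinaryStep (([] : List Char), [c], (1 : Int))).2.1]),
            8 - (l.foldl tobinaryStep (([] : List Char), [c], (1 : Int))).2.2)
        else (String.ofList (l.foldl tobinaryStep (([] : List Char), [c], (1 : Int))).1, (0 : Int)))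
        = (String.ofList (if 0 < (l.foldl tobinaryStep (([] : List Char), [c], (1 : Int))).2.2 then
              (l.foldl tobinaryStep (([] : List Char), [c], (1 : Int))).1
                ++ [binToChar (l.foldl tobinaryStep (([] : List Char), [c], (1 : Int))).2.1]
            else (l.foldl tobinaryStep (([] : List Char), [c], (1 : Int))).1),
           (if 0 < (l.foldl tobinaryStep (([] : List Char), [c], (1 : Int))).2.2 then
              8 - (l.foldl tobinaryStep (([] : List Char), [c], (1 : Int))).2.2 else 0)) := by
      split_ifs <;> rfl
    rw [hsplit, hfst, hsnd]
    simp only [Prod.mk.injEq, List.length_cons]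
    constructor
    · trivial
    · congr 1
      push_cast
      ring
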